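-- pv_equiv track=rewrite | github.com/koshihq/genops-spec | src/genops/providers/collibra/mapping.py | infer_asset_type_from_attributes
-- ===== SOURCE A (Python) =====
-- from typing import Any
--
-- def infer_asset_type_from_attributes(attributes: dict[str, Any]) -> str:
--     """
--     Infer Collibra asset type from GenOps attributes.
--
--     Args:
--         attributes: GenOps span attributes
--
--     Returns:
--         Inferred Collibra asset type
--
--     Example:
--         >>> attrs = {"genops.cost.total": 0.05, "genops.cost.provider": "openai"}
--         >>> infer_asset_type_from_attributes(attrs)
--         'AI Operation Cost'
--     """
--     # Check for cost attributes
--     if any(k.startswith("genops.cost.") for k in attributes.keys()):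
--         return "AI Operation Cost"
--
--     # Check for policy attributes
--     if any(k.startswith("genops.policy.") for k in attributes.keys()):
--         return "Policy Evaluation Event"
--
--     # Check for evaluation attributes
--     if any(k.startswith("genops.eval.") for k in attributes.keys()):
--         return "Model Evaluation"
--
--     # Check for budget attributes
--     if any(k.startswith("genops.budget.") for k in attributes.keys()):
--         return "Budget Allocation"
--
--     # Default to workflow execution
--     return "AI Workflow Execution"
-- ===== SOURCE B (Python) =====
-- def infer_asset_type_from_attributes(attributes):
--     cost = policy = evaluation = budget = False
--     for k in attributes.keys():
--         if k.startswith("genops.cost."):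
--             cost = True
--         elif k.startswith("genops.policy."):
--             policy = True
--         elif k.startswith("genops.eval."):
--             evaluation = True
--         elif k.startswith("genops.budget."):
--             budget = True
--     if cost:
--         return "AI Operation Cost"
--     if policy:
--         return "Policy Evaluation Event"
--     if evaluation:
--         return "Model Evaluation"
--     if budget:
--         return "Budget Allocation"
--     return "AI Workflow Execution"
-- ===== Notes on version B (the rewrite author's own statement) =====
-- stated objective: alternative
-- what changed: Replaces A's up-to-four separate any() scans over the keys with a single pass that records which prefix families occur, followed by a fixed-priority resolution step.
import Mathlib
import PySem

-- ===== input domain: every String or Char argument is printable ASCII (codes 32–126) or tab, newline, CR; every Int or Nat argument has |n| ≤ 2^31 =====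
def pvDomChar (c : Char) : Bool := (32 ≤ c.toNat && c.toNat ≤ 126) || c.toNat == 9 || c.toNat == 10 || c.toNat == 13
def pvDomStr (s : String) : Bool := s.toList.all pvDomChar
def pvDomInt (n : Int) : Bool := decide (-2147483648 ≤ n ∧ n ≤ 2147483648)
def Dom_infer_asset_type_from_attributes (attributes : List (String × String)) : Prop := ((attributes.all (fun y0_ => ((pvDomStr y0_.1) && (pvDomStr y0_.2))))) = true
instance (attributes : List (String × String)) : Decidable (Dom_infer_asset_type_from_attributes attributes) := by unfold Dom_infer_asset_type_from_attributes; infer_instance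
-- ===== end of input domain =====

-- B replaces A's up-to-four repeated any-scans over the keys by one pass recording which prefix families occur, then resolves priority cost→policy→eval→budget (alternative decomposition, same results).


-- ===== PORT A =====
def infer_asset_type_from_attributes (attributes : List (String × String)) : String :=
  if attributes.any (fun kv => PySem.Str.startswith kv.1 "genops.cost.") then "AI Operation Cost"
  else if attributes.any (fun kv => PySem.Str.startswith kv.1 "genops.policy.") then "Policy Evaluation Event"
  else if attributes.any (fun kv => PySem.Str.startswith kv.1 "genops.eval.") then "Model Evaluation"
  else if attributes.any (fun kv => PySem.Str.startswith kv.1 "genops.budget.") then "Budget Allocation"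
  else "AI Workflow Execution"

-- ===== PORT B =====
-- one pass over the keys: record which prefix families occur (cost, policy, eval, budget)
def pvFlagsStep (s : Bool × Bool × Bool × Bool) (kv : String × String) : Bool × Bool × Bool × Bool :=
  if PySem.Str.startswith kv.1 "genops.cost." then (true, s.2.1, s.2.2.1, s.2.2.2)
  else if PySem.Str.startswith kv.1 "genops.policy." then (s.1, true, s.2.2.1, s.2.2.2)
  else if PySem.Str.startswith kv.1 "genops.eval." then (s.1, s.2.1, true, s.2.2.2)
  else if PySem.Str.startswith kv.1 "genops.budget." then (s.1, s.2.1, s.2.2.1, true)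
  else s

def infer_asset_type_from_attributes_alt (attributes : List (String × String)) : String :=
  let s := attributes.foldl pvFlagsStep (false, false, false, false)
  if s.1 then "AI Operation Cost"
  else if s.2.1 then "Policy Evaluation Event"
  else if s.2.2.1 then "Model Evaluation"
  else if s.2.2.2 then "Budget Allocation"
  else "AI Workflow Execution"

-- ===== PRECONDITION & SPEC =====
def Spec_infer_asset_type_from_attributes (attributes : List (String × String)) (out : String) : Prop := out = infer_asset_type_from_attributes_alt attributes
instance (attributes : List (String × String)) (out : String) : Decidable (Spec_infer_asset_type_from_attributes attributes out) := by unfold Spec_infer_asset_type_from_attributes; infer_instance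

-- ===== CLAIM (what is proved, stated in full; the proofs are below) =====
def Claim_equal_infer_asset_type_from_attributes : Prop := ∀ (attributes : List (String × String)), Dom_infer_asset_type_from_attributes attributes → Spec_infer_asset_type_from_attributes attributes (infer_asset_type_from_attributes attributes)

-- ===== LEMMAS AND PROOFS =====

-- ===== VERDICT (by name: the statement is the Claim_ definition above) =====
-- the four prefixes are pairwise non-comparable, so at most one startswith test fires per key
theorem pvPrefix_excl {k p q : List Char} (hne : ¬ (p <+: q) ∧ ¬ (q <+: p))
    (hp : PySem.Chars.startswith k p = true) : PySem.Chars.startswith k q = false := by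
  by_contra h
  simp only [Bool.not_eq_false] at h
  rw [PySem.Chars.startswith_iff] at hp h
  rcases (List.prefix_or_prefix_of_prefix hp h) with h' | h'
  · exact hne.1 h'
  · exact hne.2 h'

theorem pvFlags_foldl (l : List (String × String)) (s : Bool × Bool × Bool × Bool) :
    l.foldl pvFlagsStep s =
      (s.1 || l.any (fun kv => PySem.Str.startswith kv.1 "genops.cost."),
       s.2.1 || l.any (fun kv => PySem.Str.startswith kv.1 "genops.policy."),
       s.2.2.1 || l.any (fun kv => PySem.Str.startswith kv.1 "genops.eval."),
       s.2.2.2 || l.any (fun kv => PySem.Str.startswith kv.1 "genops.budget.")) := by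
  induction l generalizing s with
  | nil => simp
  | cons kv t ih =>
    simp only [List.foldl_cons, List.any_cons, ih]
    unfold pvFlagsStep
    simp only [PySem.Str.startswith_eq] at *
    split_ifs with h1 h2 h3 h4
    · have e1 := pvPrefix_excl (q := "genops.policy.".toList) (by decide) h1
      have e2 := pvPrefix_excl (q := "genops.eval.".toList) (by decide) h1
      have e3 := pvPrefix_excl (q := "genops.budget.".toList) (by decide) h1
      simp_all
    · have e1 := pvPrefix_excl (q := "genops.cost.".toList) (by decide) h2
      have e2 := pvPrefix_excl (q := "genops.eval.".toList) (by decide) h2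
      have e3 := pvPrefix_excl (q := "genops.budget.".toList) (by decide) h2
      simp_all
    · have e1 := pvPrefix_excl (q := "genops.cost.".toList) (by decide) h3
      have e2 := pvPrefix_excl (q := "genops.policy.".toList) (by decide) h3
      have e3 := pvPrefix_excl (q := "genops.budget.".toList) (by decide) h3
      simp_all
    · have e1 := pvPrefix_excl (q := "genops.cost.".toList) (by decide) h4
      have e2 := pvPrefix_excl (q := "genops.policy.".toList) (by decide) h4
      have e3 := pvPrefix_excl (q := "genops.eval.".toList) (by decide) h4
      simp_all
    · simp_all

theorem infer_asset_type_from_attributes_spec : Claim_equal_infer_asset_type_from_attributes := by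
  intro attributes _
  unfold Spec_infer_asset_type_from_attributes infer_asset_type_from_attributes infer_asset_type_from_attributes_alt
  rw [pvFlags_foldl]
  simp only [Bool.false_or]
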